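-- pv_equiv track=rewrite | github.com/yasufumi-nakata/omoikane | src/omoikane/governance/versioning.py | _count_by_key
-- ===== SOURCE A (Python) =====
-- from typing import Any, Dict, Iterable
--
-- def _count_by_key(entries: list[Dict[str, Any]], key: str) -> Dict[str, int]:
--     counts: Dict[str, int] = {}
--     for entry in entries:
--         value = str(entry.get(key, "")).strip()
--         if not value:
--             continue
--         counts[value] = counts.get(value, 0) + 1
--     return dict(sorted(counts.items()))
-- ===== SOURCE B (Python) =====
-- def _count_by_key(entries, key):
--     vals = sorted(filter(None, (str(e.get(key, "")).strip() for e in entries)))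
--     result = {}
--     prev = None
--     n = 0
--     for v in vals:
--         if v == prev:
--             n += 1
--         else:
--             if prev is not None:
--                 result[prev] = n
--             prev = v
--             n = 1
--     if prev is not None:
--         result[prev] = n
--     return result
-- ===== Notes on version B (the rewrite author's own statement) =====
-- stated objective: alternative
-- what changed: B keeps no counts dict while aggregating: it sorts the stripped non-empty values first and then counts each maximal consecutive run in a single scan (previous value + running count), inserting the pairs in already-sorted order, instead of A's hash-map get/insert aggregation followed by sorting the items.
import Mathlib
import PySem

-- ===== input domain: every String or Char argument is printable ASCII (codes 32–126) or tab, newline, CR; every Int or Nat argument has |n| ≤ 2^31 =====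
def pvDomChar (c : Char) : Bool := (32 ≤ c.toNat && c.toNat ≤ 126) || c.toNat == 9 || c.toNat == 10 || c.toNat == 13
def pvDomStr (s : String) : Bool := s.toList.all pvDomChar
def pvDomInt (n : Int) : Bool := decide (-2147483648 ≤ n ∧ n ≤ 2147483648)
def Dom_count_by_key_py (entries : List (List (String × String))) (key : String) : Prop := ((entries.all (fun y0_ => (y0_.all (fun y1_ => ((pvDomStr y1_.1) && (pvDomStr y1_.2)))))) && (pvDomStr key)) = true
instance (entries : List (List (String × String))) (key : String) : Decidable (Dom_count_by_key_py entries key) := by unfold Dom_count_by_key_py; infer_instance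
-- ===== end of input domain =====

-- B replaces A's hash-map aggregation + final sort by: sort the stripped non-empty
-- values first, then count each consecutive run in one scan (objective: alternative).

-- ===== PORT A =====
def count_by_key_py (entries : List (List (String × String))) (key : String) : List (String × Int) :=
  let counts : PySem.Dict String Int :=
    entries.foldl (fun counts entry =>
      let value := PySem.Str.strip ((PySem.Dict.mk entry).getD key "")
      if value = "" then counts
      else counts.insert value (counts.getD value 0 + 1)) PySem.Dict.empty
  PySem.List.sorted2 counts.items (fun p => p.1) (fun p => p.2) false

-- ===== PORT B =====
-- B-side helpers: the body of B's scan loop and the final flush after the loop.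
def pvAltStep (st : Option String × Int × PySem.Dict String Int) (v : String) :
    Option String × Int × PySem.Dict String Int :=
  if some v = st.1 then (st.1, st.2.1 + 1, st.2.2)
  else (some v, 1,
    match st.1 with
    | some p => st.2.2.insert p st.2.1
    | none => st.2.2)

def pvAltFlush (st : Option String × Int × PySem.Dict String Int) : PySem.Dict String Int :=
  match st.1 with
  | some p => st.2.2.insert p st.2.1
  | none => st.2.2

def count_by_key_py_alt (entries : List (List (String × String))) (key : String) : List (String × Int) :=
  let vals := PySem.List.sorted
    ((entries.map (fun e => PySem.Str.strip ((PySem.Dict.mk e).getD key ""))).filter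
      (fun v => !(v == ""))) (fun x => x) false
  (pvAltFlush (vals.foldl pvAltStep (none, 0, PySem.Dict.empty))).items

-- ===== PRECONDITION & SPEC =====
def Spec_count_by_key_py (entries : List (List (String × String))) (key : String) (out : List (String × Int)) : Prop := out = count_by_key_py_alt entries key
instance (entries : List (List (String × String))) (key : String) (out : List (String × Int)) : Decidable (Spec_count_by_key_py entries key out) := by unfold Spec_count_by_key_py; infer_instance

-- ===== CLAIM (what is proved, stated in full; the proofs are below) =====
def Claim_equal_count_by_key_py : Prop := ∀ (entries : List (List (String × String))) (key : String), Dom_count_by_key_py entries key → Spec_count_by_key_py entries key (count_by_key_py entries key)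

-- ===== LEMMAS AND PROOFS =====

-- The consecutive-run groups of a list: (value, length of run) for each maximal run.
def pvRuns : List String → List (String × Int)
  | [] => []
  | x :: xs =>
      (x, 1 + ((xs.takeWhile (· == x)).length : Int)) :: pvRuns (xs.dropWhile (· == x))
termination_by s => s.length
decreasing_by
  simpa using Nat.lt_succ_of_le (List.length_dropWhile_le _ _)

-- On a list whose elements are all ≥ x, the x's form the leading run.
lemma pvSplit (x : String) : ∀ (s : List String), s.Pairwise (· ≤ ·) → (∀ y ∈ s, x ≤ y) →
    s.count x = (s.takeWhile (· == x)).length ∧ ∀ y ∈ s.dropWhile (· == x), x < y := by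
  intro s
  induction s with
  | nil => simp
  | cons y t ih =>
    intro hp hall
    by_cases hyx : y = x
    · subst hyx
      obtain ⟨h1, h2⟩ := ih hp.of_cons (fun z hz => hall z (List.mem_cons_of_mem _ hz))
      refine ⟨?_, by simpa using h2⟩
      simp [h1]
    · have hxy : x < y := lt_of_le_of_ne (hall y (List.mem_cons_self)) (fun h => hyx h.symm)
      have hlt : ∀ z ∈ y :: t, x < z := by
        intro z hz
        rcases List.mem_cons.mp hz with h | h
        · exact h ▸ hxy
        · exact lt_of_lt_of_le hxy (List.rel_of_pairwise_cons hp h)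
      have hnot : x ∉ y :: t := fun hm => lt_irrefl x (hlt x hm)
      have hbe : (y == x) = false := by simpa using hyx
      constructor
      · simp [List.count_eq_zero_of_not_mem hnot, List.takeWhile, hbe]
      · simpa [List.dropWhile, hbe] using hlt

-- A-side step 1: the aggregation loop of A is Counter(vals).
lemma pvCountsEq (entries : List (List (String × String))) (key : String) :
    entries.foldl (fun counts entry =>
      let value := PySem.Str.strip ((PySem.Dict.mk entry).getD key "")
      if value = "" then counts
      else counts.insert value (counts.getD value 0 + 1)) PySem.Dict.empty
    = PySem.Dict.counter
        ((entries.map (fun e => PySem.Str.strip ((PySem.Dict.mk e).getD key ""))).filter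
          (fun v => !(v == ""))) := by
  rw [← PySem.Dict.foldl_insert_getD_add_one_eq_counter,
    ← PySem.List.foldl_if_eq_foldl_filter (p := fun v => !(v == ""))
      (f := fun d v => PySem.Dict.insert d v (d.getD v 0 + 1)),
    List.foldl_map]
  apply PySem.List.foldl_congr_mem
  intro acc x _
  by_cases h : PySem.Str.strip ((PySem.Dict.mk x).getD key "") = "" <;> simp [h]

-- insertion with a pointwise-equal "before" test is the same insertion
lemma pvInsertByCongr {α : Type} (b1 b2 : α → α → Bool) (x : α) :
    ∀ (acc : List α), (∀ c ∈ acc, b1 x c = b2 x c) →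
    PySem.List.insertBy b1 x acc = PySem.List.insertBy b2 x acc := by
  intro acc
  induction acc with
  | nil => intro _; rfl
  | cons y ys ih =>
    intro h
    simp only [PySem.List.insertBy, h y List.mem_cons_self]
    split
    · rfl
    · rw [show PySem.List.insertBy b1 x ys = PySem.List.insertBy b2 x ys from
        ih (fun c hc => h c (List.mem_cons_of_mem _ hc))]

-- an insertion sort whose "before" tests agree on all pairs drawn from the input
lemma pvFoldlInsertByCongr {α : Type} (b1 b2 : α → α → Bool) :
    ∀ (l acc : List α), (∀ a ∈ l, ∀ c, (c ∈ acc ∨ c ∈ l) → b1 a c = b2 a c) →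
    l.foldl (fun acc x => PySem.List.insertBy b1 x acc) acc
      = l.foldl (fun acc x => PySem.List.insertBy b2 x acc) acc := by
  intro l
  induction l with
  | nil => intro _ _; rfl
  | cons x xs ih =>
    intro acc h
    simp only [List.foldl_cons]
    rw [pvInsertByCongr b1 b2 x acc (fun c hc => h x List.mem_cons_self c (Or.inl hc))]
    apply ih
    intro a ha c hc
    refine h a (List.mem_cons_of_mem _ ha) c ?_
    rcases hc with hc | hc
    · rcases (PySem.List.mem_insertBy _ _ _ _).mp hc with h' | h'
      · exact Or.inr (h' ▸ List.mem_cons_self)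
      · exact Or.inl h'
    · exact Or.inr (List.mem_cons_of_mem _ hc)

-- A-side step 2: tuple sort = sort by first component when the first components are distinct.
lemma pvSorted2EqSorted (L : List (String × Int)) (hnd : (L.map Prod.fst).Nodup) :
    PySem.List.sorted2 L (fun p => p.1) (fun p => p.2) false
    = PySem.List.sorted L (fun p => p.1) false := by
  have hinj := List.inj_on_of_nodup_map hnd
  simp only [PySem.List.sorted2, PySem.List.sorted, if_neg (by decide : ¬ (false = true))]
  apply pvFoldlInsertByCongr
  intro a ha c hc
  rcases hc with hc | hc
  · cases hc
  by_cases hac : a = c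
  · subst hac; simp
  · have hne : a.1 ≠ c.1 := fun h => hac (hinj ha hc h)
    rcases lt_trichotomy a.1 c.1 with h | h | h
    · simp [h]
    · exact absurd h hne
    · simp [h, not_lt_of_gt h]

lemma pvNotContains (d : PySem.Dict String Int) (p : String) (h : ∀ k ∈ d.keys, k < p) :
    d.contains p = false := by
  rw [← Bool.not_eq_true, PySem.Dict.contains_iff_mem_keys]
  exact fun hm => lt_irrefl p (h p hm)

-- B-side loop invariant: from a mid-run state, the scan emits the pending run and
-- then one (value, run length) pair per remaining run.
lemma pvLoop : ∀ (s : List String) (p : String) (n : Int) (d : PySem.Dict String Int),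
    s.Pairwise (· ≤ ·) → (∀ x ∈ s, p ≤ x) → (∀ k ∈ d.keys, k < p) →
    (pvAltFlush (s.foldl pvAltStep (some p, n, d))).items
      = d.items ++ (p, n + (s.count p : Int)) :: pvRuns (s.dropWhile (· == p)) := by
  intro s
  induction s with
  | nil =>
    intro p n d _ _ hk
    simp [pvAltFlush, pvRuns,
      PySem.Dict.items_insert_of_not_contains d n (pvNotContains d p hk)]
  | cons x rest ih =>
    intro p n d hp hall hk
    by_cases hx : x = p
    · subst hx
      rw [List.foldl_cons, show pvAltStep (some x, n, d) x = (some x, n + 1, d) by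
        simp [pvAltStep]]
      rw [ih x (n + 1) d hp.of_cons (fun z hz => hall z (List.mem_cons_of_mem _ hz)) hk]
      have : (x :: rest).count x = rest.count x + 1 := List.count_cons_self
      simp only [this, List.dropWhile_cons, BEq.rfl, if_pos trivial]
      push_cast
      ring_nf
    · have hpx : p < x := lt_of_le_of_ne (hall x List.mem_cons_self) (fun h => hx h.symm)
      have hgt : ∀ z ∈ rest, p < z := fun z hz =>
        lt_of_lt_of_le hpx (List.rel_of_pairwise_cons hp hz)
      have hnotmem : p ∉ x :: rest := by
        intro hm
        rcases List.mem_cons.mp hm with h | h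
        · exact hx h.symm
        · exact lt_irrefl p (hgt p h)
      have hstep : pvAltStep (some p, n, d) x = (some x, 1, d.insert p n) := by
        simp [pvAltStep, fun h : x = p => hx h]
      rw [List.foldl_cons, hstep,
        ih x 1 (d.insert p n) hp.of_cons (fun z hz => List.rel_of_pairwise_cons hp hz) ?keys]
      case keys =>
        intro k hkm
        rw [PySem.Dict.keys_insert_of_not_contains d n (pvNotContains d p hk)] at hkm
        rcases List.mem_append.mp hkm with h | h
        · exact lt_trans (hk k h) hpx
        · simp at h; exact h ▸ hpx
      rw [PySem.Dict.items_insert_of_not_contains d n (pvNotContains d p hk)]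
      have hdw : (x :: rest).dropWhile (· == p) = x :: rest := by
        simp [hx]
      have hcount0 : (x :: rest).count p = 0 := List.count_eq_zero_of_not_mem hnotmem
      have hruns : pvRuns (x :: rest)
          = (x, 1 + ((rest.takeWhile (· == x)).length : Int)) :: pvRuns (rest.dropWhile (· == x)) := by
        rw [pvRuns]
      have htw : rest.count x = (rest.takeWhile (· == x)).length :=
        (pvSplit x rest hp.of_cons (fun z hz => List.rel_of_pairwise_cons hp hz)).1
      simp [hdw, hruns, hcount0, ← htw]

-- the runs of a sorted list: strictly increasing first components that enumerate the
-- distinct elements, each paired with its multiplicity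
lemma pvRunsSpec : ∀ (s : List String), s.Pairwise (· ≤ ·) →
    ((pvRuns s).map Prod.fst).Pairwise (· < ·)
    ∧ (∀ k, k ∈ (pvRuns s).map Prod.fst ↔ k ∈ s)
    ∧ pvRuns s = ((pvRuns s).map Prod.fst).map (fun k => (k, (s.count k : Int))) := by
  intro s
  induction s using pvRuns.induct with
  | case1 => intro _; simp [pvRuns]
  | case2 x xs ih =>
    intro hp
    have hall : ∀ y ∈ xs, x ≤ y := fun z hz => List.rel_of_pairwise_cons hp hz
    obtain ⟨hcnt, hgt⟩ := pvSplit x xs hp.of_cons hall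
    have hpt : (xs.dropWhile (· == x)).Pairwise (· ≤ ·) :=
      hp.of_cons.sublist (List.dropWhile_sublist _)
    obtain ⟨ihp, ihmem, iheq⟩ := ih hpt
    have hsub : ∀ k ∈ (pvRuns (xs.dropWhile (· == x))).map Prod.fst, x < k :=
      fun k hk => hgt k ((ihmem k).mp hk)
    have hxs_split : xs.takeWhile (· == x) ++ xs.dropWhile (· == x) = xs :=
      List.takeWhile_append_dropWhile
    refine ⟨?_, ?_, ?_⟩
    · rw [pvRuns]
      simp only [List.map_cons]
      exact List.pairwise_cons.mpr ⟨hsub, ihp⟩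
    · intro k
      rw [pvRuns]
      simp only [List.map_cons, List.mem_cons]
      constructor
      · rintro (rfl | h)
        · exact Or.inl rfl
        · exact Or.inr ((List.dropWhile_sublist (l := xs) (· == x)).mem ((ihmem k).mp h))
      · rintro (rfl | hm)
        · exact Or.inl rfl
        · rw [← hxs_split] at hm
          rcases List.mem_append.mp hm with hm | hm
          · exact Or.inl (by simpa using List.mem_takeWhile_imp hm)
          · exact Or.inr ((ihmem k).mpr hm)
    · rw [pvRuns]
      simp only [List.map_cons]
      congr 1
      · simp [List.count_cons_self, hcnt]; ring
      · conv_lhs => rw [iheq]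
        apply List.map_congr_left
        intro k hk
        have hxk : x < k := hsub k hk
        have hkx : k ≠ x := ne_of_gt hxk
        have hk1 : (x :: xs).count k = xs.count k := by simp [hkx.symm]
        have hk2 : xs.count k = (xs.dropWhile (· == x)).count k := by
          conv_lhs => rw [← hxs_split]
          rw [List.count_append]
          have : (xs.takeWhile (· == x)).count k = 0 := by
            apply List.count_eq_zero_of_not_mem
            intro hm
            have := List.mem_takeWhile_imp hm
            simp at this
            exact hkx this
          omega
        simp [hk1, hk2]

-- B computes the runs of any sorted list it scans.
lemma pvScanEq (s : List String) (hp : s.Pairwise (· ≤ ·)) :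
    (pvAltFlush (s.foldl pvAltStep (none, 0, PySem.Dict.empty))).items = pvRuns s := by
  cases s with
  | nil => simp [pvAltFlush, pvRuns, PySem.Dict.empty]
  | cons x t =>
    have hall : ∀ z ∈ t, x ≤ z := fun z hz => List.rel_of_pairwise_cons hp hz
    rw [List.foldl_cons, show pvAltStep (none, 0, PySem.Dict.empty) x
        = (some x, 1, PySem.Dict.empty) by simp [pvAltStep]]
    rw [pvLoop t x 1 PySem.Dict.empty hp.of_cons hall
      (by rw [PySem.Dict.keys_empty]; intro k hk; cases hk)]
    have htw : t.count x = (t.takeWhile (· == x)).length := (pvSplit x t hp.of_cons hall).1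
    rw [pvRuns]
    simp [PySem.Dict.empty, htw]

-- B computes the runs of the sorted value list.
lemma pvAltEqRuns (vs : List String) :
    (pvAltFlush ((PySem.List.sorted vs (fun x => x) false).foldl pvAltStep
        (none, 0, PySem.Dict.empty))).items
      = pvRuns (PySem.List.sorted vs (fun x => x) false) :=
  pvScanEq _ (PySem.List.sorted_pairwise vs (fun x => x))

-- both sides equal the canonical table: sorted distinct values, each with its count
lemma pvMain (vs : List String) :
    PySem.List.sorted2 (PySem.Dict.counter vs).items (fun p => p.1) (fun p => p.2) false
    = pvRuns (PySem.List.sorted vs (fun x => x) false) := by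
  obtain ⟨hlt, hmem, heq⟩ :=
    pvRunsSpec (PySem.List.sorted vs (fun x => x) false)
      (PySem.List.sorted_pairwise vs (fun x => x))
  have hKnd : ((pvRuns (PySem.List.sorted vs (fun x => x) false)).map Prod.fst).Nodup :=
    hlt.imp (fun h => ne_of_lt h)
  have hmemv : ∀ k, k ∈ (pvRuns (PySem.List.sorted vs (fun x => x) false)).map Prod.fst
      ↔ k ∈ PySem.Set.ofList vs := by
    intro k
    rw [hmem k, PySem.List.mem_sorted, PySem.Set.mem_ofList]
  have hperm : ((pvRuns (PySem.List.sorted vs (fun x => x) false)).map Prod.fst).Perm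
      (PySem.Set.ofList vs) :=
    (List.perm_ext_iff_of_nodup hKnd (PySem.Set.nodup_ofList vs)).mpr hmemv
  rw [PySem.Dict.items_counter vs]
  rw [pvSorted2EqSorted _ (by
    rw [List.map_map,
      show (Prod.fst ∘ fun k => (k, (List.count k vs : Int))) = id from rfl, List.map_id]
    exact PySem.Set.nodup_ofList vs)]
  rw [PySem.List.sorted_eq_of_perm_of_pairwise_lt _
    (((pvRuns (PySem.List.sorted vs (fun x => x) false)).map Prod.fst).map
      (fun k => (k, (List.count k vs : Int)))) _
    (hperm.map _) (by
      rw [List.pairwise_map]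
      exact hlt)]
  conv_rhs => rw [heq]
  apply List.map_congr_left
  intro k _
  have : List.count k (PySem.List.sorted vs (fun x => x) false) = List.count k vs :=
    (PySem.List.sorted_perm vs (fun x => x) false).count_eq k
  simp [this]

-- ===== VERDICT (by name: the statement is the Claim_ definition above) =====
theorem count_by_key_py_spec : Claim_equal_count_by_key_py := by
  intro entries key _
  unfold Spec_count_by_key_py count_by_key_py count_by_key_py_alt
  rw [pvCountsEq, pvMain, pvAltEqRuns]
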